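-- pv_equiv track=rewrite | github.com/00-hidan-00/code_challenge | lesson_4 - FUNCTIONS/homework.py | task_6_option_4
-- ===== SOURCE A (Python) =====
-- def task_6_option_4(lst: list, n: int = 4) -> dict[str:int]:
--     d = {'equal': lst.count(n), "less": 0, "more": 0}
--     for val in lst:
--         if val < n:
--             d['less'] += 1
--         elif val > n:
--             d['more'] += 1
--     return d
-- ===== SOURCE B (Python) =====
-- def _bisect_left(s, x):
--     # CPython's bisect.bisect_left, written out (A imports no modules)
--     lo, hi = 0, len(s)
--     while lo < hi:
--         mid = (lo + hi) // 2
--         if s[mid] < x: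
--             lo = mid + 1
--         else:
--             hi = mid
--     return lo
--
--
-- def _bisect_right(s, x):
--     # CPython's bisect.bisect_right, written out
--     lo, hi = 0, len(s)
--     while lo < hi:
--         mid = (lo + hi) // 2
--         if x < s[mid]:
--             hi = mid
--         else:
--             lo = mid + 1
--     return lo
--
--
-- def task_6_option_4(lst: list, n: int = 4) -> dict:
--     s = sorted(lst)
--     left = _bisect_left(s, n)
--     right = _bisect_right(s, n)
--     return {'equal': right - left, 'less': left, 'more': len(lst) - right}
-- ===== Notes on version B (the rewrite author's own statement) =====
-- stated objective: alternative
-- what changed: Replaces A's count() pass plus a per-element branching loop with sort-then-binary-search: the three counts are read off from bisect_left/bisect_right positions in a sorted copy.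
import Mathlib
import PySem

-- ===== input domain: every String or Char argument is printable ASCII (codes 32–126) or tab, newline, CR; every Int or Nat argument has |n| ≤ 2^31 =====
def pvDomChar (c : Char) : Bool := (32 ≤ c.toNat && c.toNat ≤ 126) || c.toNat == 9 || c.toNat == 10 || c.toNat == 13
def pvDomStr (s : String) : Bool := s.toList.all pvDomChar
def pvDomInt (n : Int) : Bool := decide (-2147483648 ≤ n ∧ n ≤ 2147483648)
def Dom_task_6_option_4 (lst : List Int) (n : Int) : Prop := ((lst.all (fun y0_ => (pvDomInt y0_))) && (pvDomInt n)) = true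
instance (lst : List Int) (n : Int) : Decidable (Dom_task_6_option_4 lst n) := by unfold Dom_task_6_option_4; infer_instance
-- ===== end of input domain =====

-- B replaces A's count() pass plus per-element branching loop by sort + binary search
-- (bisect positions in a sorted copy); same return value, a genuinely different strategy.

-- ===== PORT A =====
-- d = {'equal': lst.count(n), 'less': 0, 'more': 0}; the loop bumps 'less'/'more'.
-- (d['less'] += 1 is ported as Dict.modify; the key is always present, so the default 0 is never read.)
def task_6_option_4 (lst : List Int) (n : Int) : List (String × Int) :=
  let d : PySem.Dict String Int :=
    PySem.Dict.ofList [("equal", (PySem.List.count lst n : Int)), ("less", 0), ("more", 0)]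
  (lst.foldl (fun d val =>
    if val < n then d.modify "less" 0 (· + 1)
    else if val > n then d.modify "more" 0 (· + 1)
    else d) d).items

-- ===== PORT B =====
-- Source B hand-writes CPython's bisect_left/bisect_right lo/hi loops; PySem.List.bisectLeft /
-- bisectRight are exactly those loops, so they are the step-for-step port of the helpers.
def task_6_option_4_alt (lst : List Int) (n : Int) : List (String × Int) :=
  let s := PySem.List.sorted lst (fun x => x) false
  let left := PySem.List.bisectLeft s n
  let right := PySem.List.bisectRight s n
  [("equal", (right : Int) - (left : Int)), ("less", (left : Int)),
   ("more", (lst.length : Int) - (right : Int))]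

-- ===== PRECONDITION & SPEC =====
def Spec_task_6_option_4 (lst : List Int) (n : Int) (out : List (String × Int)) : Prop := out = task_6_option_4_alt lst n
instance (lst : List Int) (n : Int) (out : List (String × Int)) : Decidable (Spec_task_6_option_4 lst n out) := by unfold Spec_task_6_option_4; infer_instance

-- ===== CLAIM (what is proved, stated in full; the proofs are below) =====
def Claim_equal_task_6_option_4 : Prop := ∀ (lst : List Int) (n : Int), Dom_task_6_option_4 lst n → Spec_task_6_option_4 lst n (task_6_option_4 lst n)

-- ===== LEMMAS AND PROOFS =====

-- A's loop, run from arbitrary current values a b c of the three entries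
lemma foldA_items (lst : List Int) (n : Int) (a b c : Int) :
    (lst.foldl (fun d val =>
      if val < n then d.modify "less" 0 (· + 1)
      else if val > n then d.modify "more" 0 (· + 1)
      else d) (PySem.Dict.ofList [("equal", a), ("less", b), ("more", c)])).items
    = [("equal", a), ("less", b + (lst.countP (· < n) : Int)),
       ("more", c + (lst.countP (fun x => n < x) : Int))] := by
  induction lst generalizing b c with
  | nil =>
    simp only [List.foldl_nil, List.countP_nil, Nat.cast_zero, add_zero]
    rfl
  | cons x xs ih =>
    simp only [List.foldl_cons]
    rcases lt_trichotomy x n with h | h | h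
    · rw [if_pos h]
      have hd : (PySem.Dict.ofList [("equal", a), ("less", b), ("more", c)]).modify "less" 0 (· + 1)
          = PySem.Dict.ofList [("equal", a), ("less", b + 1), ("more", c)] := rfl
      rw [hd, ih]
      have e1 : b + 1 + ((xs.countP (fun x => decide (x < n)) : Nat) : Int)
          = b + (((x :: xs).countP (fun x => decide (x < n)) : Nat) : Int) := by
        rw [List.countP_cons, if_pos (decide_eq_true h)]; push_cast; ring
      have e2 : (((x :: xs).countP (fun x => decide (n < x)) : Nat) : Int)
          = ((xs.countP (fun x => decide (n < x)) : Nat) : Int) := by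
        rw [List.countP_cons, if_neg (by simp; omega), Nat.add_zero]
      rw [e1, e2]
    · subst h
      rw [if_neg (lt_irrefl x), if_neg (lt_irrefl x), ih]
      have e1 : (((x :: xs).countP (fun y => decide (y < x)) : Nat) : Int)
          = ((xs.countP (fun y => decide (y < x)) : Nat) : Int) := by
        rw [List.countP_cons, if_neg (by simp), Nat.add_zero]
      have e2 : (((x :: xs).countP (fun y => decide (x < y)) : Nat) : Int)
          = ((xs.countP (fun y => decide (x < y)) : Nat) : Int) := by
        rw [List.countP_cons, if_neg (by simp), Nat.add_zero]
      rw [e1, e2]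
    · rw [if_neg (by omega), if_pos h]
      have hd : (PySem.Dict.ofList [("equal", a), ("less", b), ("more", c)]).modify "more" 0 (· + 1)
          = PySem.Dict.ofList [("equal", a), ("less", b), ("more", c + 1)] := rfl
      rw [hd, ih]
      have e1 : (((x :: xs).countP (fun x => decide (x < n)) : Nat) : Int)
          = ((xs.countP (fun x => decide (x < n)) : Nat) : Int) := by
        rw [List.countP_cons, if_neg (by simp; omega), Nat.add_zero]
      have e2 : c + 1 + ((xs.countP (fun x => decide (n < x)) : Nat) : Int)
          = c + (((x :: xs).countP (fun x => decide (n < x)) : Nat) : Int) := by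
        rw [List.countP_cons, if_pos (decide_eq_true h)]; push_cast; ring
      rw [e1, e2]

-- countP of a predicate that holds exactly before position k
lemma countP_eq_of_cut (s : List Int) (p : Int → Bool) (k : Nat) (hk : k ≤ s.length)
    (h1 : ∀ (j : Nat) (hj : j < s.length), j < k → p s[j])
    (h2 : ∀ (j : Nat) (hj : j < s.length), k ≤ j → ¬ p s[j]) : s.countP p = k := by
  rw [← List.take_append_drop k s, List.countP_append]
  · have ht : (s.take k).countP p = (s.take k).length := by
      apply List.countP_eq_length.2
      intro a ha
      obtain ⟨i, hi, rfl⟩ := List.mem_iff_getElem.1 ha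
      have hik : i < k := lt_of_lt_of_le hi (by simp)
      have hil : i < s.length := lt_of_lt_of_le hik hk
      rw [List.getElem_take]
      exact h1 i hil hik
    have hd : (s.drop k).countP p = 0 := by
      apply List.countP_eq_zero.2
      intro a ha
      obtain ⟨i, hi, rfl⟩ := List.mem_iff_getElem.1 ha
      have hil : k + i < s.length := by have := List.length_drop (l := s) (i := k) ▸ hi; omega
      rw [List.getElem_drop]
      exact h2 (k + i) hil (Nat.le_add_right _ _)
    rw [ht, hd, List.length_take]
    omega

lemma countP_lt_eq_bisectLeft (s : List Int) (n : Int)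
    (hs : s.Pairwise (· ≤ ·)) : s.countP (· < n) = PySem.List.bisectLeft s n := by
  obtain ⟨hk, h1, h2⟩ := PySem.List.bisectLeft_spec s n hs
  exact countP_eq_of_cut s _ _ hk
    (fun j hj hjk => decide_eq_true (h1 j hj hjk))
    (fun j hj hjk => by simpa using not_lt.2 (h2 j hj hjk))

lemma countP_le_eq_bisectRight (s : List Int) (n : Int)
    (hs : s.Pairwise (· ≤ ·)) : s.countP (· ≤ n) = PySem.List.bisectRight s n := by
  obtain ⟨hk, h1, h2⟩ := PySem.List.bisectRight_spec s n hs
  exact countP_eq_of_cut s _ _ hk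
    (fun j hj hjk => decide_eq_true (h1 j hj hjk))
    (fun j hj hjk => by simpa using not_le.2 (h2 j hj hjk))

lemma count_tri (l : List Int) (n : Int) :
    l.countP (· ≤ n) = l.countP (· < n) + l.count n ∧
    l.countP (· ≤ n) + l.countP (fun x => n < x) = l.length := by
  induction l with
  | nil => simp
  | cons x xs ih =>
    simp only [List.countP_cons, List.count_cons, List.length_cons, beq_iff_eq,
      decide_eq_true_eq]
    constructor <;> split_ifs <;> omega

-- ===== VERDICT (by name: the statement is the Claim_ definition above) =====
theorem task_6_option_4_spec : Claim_equal_task_6_option_4 := by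
  intro lst n _
  unfold Spec_task_6_option_4 task_6_option_4 task_6_option_4_alt
  simp only []
  rw [foldA_items]
  have hperm : (PySem.List.sorted lst (fun x => x) false).Perm lst :=
    PySem.List.sorted_perm lst (fun x => x) false
  have hpw : (PySem.List.sorted lst (fun x => x) false).Pairwise (· ≤ ·) := by
    simpa using PySem.List.sorted_pairwise lst (fun x => x)
  have hl := countP_lt_eq_bisectLeft _ n hpw
  have hr := countP_le_eq_bisectRight _ n hpw
  have hclt : (PySem.List.sorted lst (fun x => x) false).countP (· < n) = lst.countP (· < n) :=
    hperm.countP_eq _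
  have hcle : (PySem.List.sorted lst (fun x => x) false).countP (· ≤ n) = lst.countP (· ≤ n) :=
    hperm.countP_eq _
  obtain ⟨htri1, htri2⟩ := count_tri lst n
  have hcount : PySem.List.count lst n = lst.count n := PySem.List.count_eq lst n
  have g2 : (0 : Int) + ((lst.countP (fun x => decide (x < n)) : Nat) : Int)
      = ((PySem.List.bisectLeft (PySem.List.sorted lst (fun x => x) false) n : Nat) : Int) := by
    rw [← hl, hclt]; ring
  have g3 : (0 : Int) + ((lst.countP (fun x => decide (n < x)) : Nat) : Int)
      = ((lst.length : Nat) : Int)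
        - ((PySem.List.bisectRight (PySem.List.sorted lst (fun x => x) false) n : Nat) : Int) := by
    rw [← hr, hcle]; omega
  have g1 : ((PySem.List.count lst n : Nat) : Int)
      = ((PySem.List.bisectRight (PySem.List.sorted lst (fun x => x) false) n : Nat) : Int)
        - ((PySem.List.bisectLeft (PySem.List.sorted lst (fun x => x) false) n : Nat) : Int) := by
    rw [← hl, ← hr, hclt, hcle, hcount]; omega
  rw [g1, ← g2, ← g3]
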